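-- pv_equiv track=rewrite | github.com/hyunse0/Algorithm | Python/PROGRAMMERS/모의고사.py | solution
-- ===== SOURCE A (Python) =====
-- def set_len(pattern, goal):
--     while len(pattern) < goal:
--             pattern *= 2
--
--     return pattern
--
-- def solution(answers):
--     pattern1 = [1, 2, 3, 4, 5]
--     pattern2 = [2, 1, 2, 3, 2, 4, 2, 5]
--     pattern3 = [3, 3, 1, 1, 2, 2, 4, 4, 5, 5]
--
--     goal = len(answers)
--     person1 = set_len(pattern1, goal)
--     person2 = set_len(pattern2, goal)
--     person3 = set_len(pattern3, goal)
--
--     cnt_lst = []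
--     for person in (person1, person2, person3):
--         cnt = 0
--         for i in range(goal):
--             if answers[i] == person[i]:
--                 cnt += 1
--         cnt_lst.append(cnt)
--
--     answer = []
--     for i in range(3):
--         if cnt_lst[i] == max(cnt_lst):
--             answer.append(i+1)
--
--     return answer
-- ===== SOURCE B (Python) =====
-- def solution(answers):
--     p1 = [1, 2, 3, 4, 5]
--     p2 = [2, 1, 2, 3, 2, 4, 2, 5]
--     p3 = [3, 3, 1, 1, 2, 2, 4, 4, 5, 5]
--     c1 = c2 = c3 = 0
--     for i, a in enumerate(answers):
--         if a == p1[i % 5]: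
--             c1 += 1
--         if a == p2[i % 8]:
--             c2 += 1
--         if a == p3[i % 10]:
--             c3 += 1
--     m = max(c1, c2, c3)
--     return [j + 1 for j, c in enumerate((c1, c2, c3)) if c == m]
-- ===== Notes on version B (the rewrite author's own statement) =====
-- stated objective: idiomatic
-- what changed: B keeps the three base patterns unextended and makes one fused enumerate pass with cyclic modular indexing (answers[i] vs pattern[i % len]), replacing A's set_len list-doubling plus three separate per-student counting passes.
import Mathlib
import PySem

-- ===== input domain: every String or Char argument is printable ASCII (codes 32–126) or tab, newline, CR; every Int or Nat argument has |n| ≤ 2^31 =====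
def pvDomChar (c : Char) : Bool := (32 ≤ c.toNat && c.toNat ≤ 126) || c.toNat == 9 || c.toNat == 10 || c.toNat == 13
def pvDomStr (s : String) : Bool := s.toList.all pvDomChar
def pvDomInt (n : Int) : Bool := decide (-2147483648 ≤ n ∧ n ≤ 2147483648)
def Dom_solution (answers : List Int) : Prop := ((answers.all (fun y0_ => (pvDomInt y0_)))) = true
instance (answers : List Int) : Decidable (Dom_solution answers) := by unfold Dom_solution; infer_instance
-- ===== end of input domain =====

-- B replaces A's pattern-doubling (set_len) plus three separate counting passes by a single
-- fused enumerate pass with cyclic modular indexing; objective: idiomatic.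

-- ===== PORT A =====
-- while len(pattern) < goal: pattern *= 2   (the 'pattern ≠ []' conjunct only makes the
-- recursion total; A only ever calls set_len on nonempty literal patterns)
def setLen (pattern : List Int) (goal : Nat) : List Int :=
  if pattern.length < goal ∧ pattern ≠ [] then setLen (pattern ++ pattern) goal else pattern
termination_by goal - pattern.length
decreasing_by
  rename_i h
  have : 0 < pattern.length := List.length_pos_iff.mpr h.2
  simp only [List.length_append]; omega

-- cnt = 0; for i in range(goal): if answers[i] == person[i]: cnt += 1   (indices always in range)
def countLoop (answers person : List Int) (goal : Nat) : Int :=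
  (PySem.List.pyRange 0 (goal : Int) 1).foldl
    (fun cnt i =>
      if PySem.List.pyGetD answers i 0 = PySem.List.pyGetD person i 0 then cnt + 1 else cnt) 0

def solution (answers : List Int) : List Int :=
  let goal := answers.length
  let person1 := setLen [1, 2, 3, 4, 5] goal
  let person2 := setLen [2, 1, 2, 3, 2, 4, 2, 5] goal
  let person3 := setLen [3, 3, 1, 1, 2, 2, 4, 4, 5, 5] goal
  let cntLst := [countLoop answers person1 goal, countLoop answers person2 goal,
                 countLoop answers person3 goal]
  -- max(cnt_lst): cnt_lst is a nonempty literal list, so max? is some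
  let m := (PySem.List.max? cntLst (fun y => y)).getD 0
  (PySem.List.pyRange 0 3 1).foldl
    (fun answer i => if PySem.List.pyGetD cntLst i 0 = m then answer ++ [i + 1] else answer) []

-- ===== PORT B =====
def solution_alt (answers : List Int) : List Int :=
  let p1 : List Int := [1, 2, 3, 4, 5]
  let p2 : List Int := [2, 1, 2, 3, 2, 4, 2, 5]
  let p3 : List Int := [3, 3, 1, 1, 2, 2, 4, 4, 5, 5]
  let cs := (PySem.List.enumerate answers 0).foldl
    (fun (c : Int × Int × Int) ia =>
      (if ia.2 = PySem.List.pyGetD p1 (PySem.Int.mod ia.1 5) 0 then c.1 + 1 else c.1,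
       if ia.2 = PySem.List.pyGetD p2 (PySem.Int.mod ia.1 8) 0 then c.2.1 + 1 else c.2.1,
       if ia.2 = PySem.List.pyGetD p3 (PySem.Int.mod ia.1 10) 0 then c.2.2 + 1 else c.2.2))
    (0, 0, 0)
  let m := max cs.1 (max cs.2.1 cs.2.2)
  (PySem.List.enumerate [cs.1, cs.2.1, cs.2.2] 0).filterMap
    (fun jc => if jc.2 = m then some (jc.1 + 1) else none)

-- ===== PRECONDITION & SPEC =====
def Spec_solution (answers : List Int) (out : List Int) : Prop := out = solution_alt answers
instance (answers : List Int) (out : List Int) : Decidable (Spec_solution answers out) := by unfold Spec_solution; infer_instance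

-- ===== CLAIM (what is proved, stated in full; the proofs are below) =====
def Claim_equal_solution : Prop := ∀ (answers : List Int), Dom_solution answers → Spec_solution answers (solution answers)

-- ===== LEMMAS AND PROOFS =====

-- the common normal form: one modular-index count per student, then the selection
def cnt (answers p : List Int) (L : Int) : Int :=
  (PySem.List.pyRange 0 (answers.length : Int) 1).foldl
    (fun c i =>
      if PySem.List.pyGetD answers i 0 = PySem.List.pyGetD p (PySem.Int.mod i L) 0
      then c + 1 else c) 0

def sel (c1 c2 c3 : Int) : List Int :=
  (if c1 = max c1 (max c2 c3) then [1] else []) ++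
  (if c2 = max c1 (max c2 c3) then [2] else []) ++
  (if c3 = max c1 (max c2 c3) then [3] else [])

lemma getD_append_self_mod (p : List Int) (hp : p ≠ []) (j : Nat) (hj : j < p.length + p.length) :
    (p ++ p).getD j 0 = p.getD (j % p.length) 0 := by
  have hl : 0 < p.length := List.length_pos_iff.mpr hp
  by_cases h : j < p.length
  · rw [Nat.mod_eq_of_lt h]
    simp [List.getD, List.getElem?_append_left h]
  · have hle : p.length ≤ j := Nat.le_of_not_lt h
    rw [Nat.mod_eq_sub_mod hle, Nat.mod_eq_of_lt (by omega)]
    simp [List.getD, List.getElem?_append_right hle]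

lemma setLen_getD (p : List Int) (goal : Nat) : ∀ i : Nat, p ≠ [] → i < goal →
    (setLen p goal).getD i 0 = p.getD (i % p.length) 0 := by
  fun_induction setLen p goal with
  | case1 p h ih =>
      intro i hp hi
      have hl : 0 < p.length := List.length_pos_iff.mpr hp
      rw [ih i (by simp [hp]) hi]
      have h2 : (p ++ p).length = p.length + p.length := by simp
      rw [h2, getD_append_self_mod p hp _ (Nat.mod_lt _ (by omega))]
      rw [Nat.mod_mod_of_dvd i ⟨2, by ring⟩]
  | case2 p h =>
      intro i hp hi
      have hle : goal ≤ p.length := by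
        by_contra hc
        exact h ⟨Nat.lt_of_not_le hc, hp⟩
      rw [Nat.mod_eq_of_lt (by omega)]

lemma countLoop_eq_cnt (answers p : List Int) (L : Int) (hp : p ≠ [])
    (hL : (p.length : Int) = L) :
    countLoop answers (setLen p answers.length) answers.length = cnt answers p L := by
  unfold countLoop cnt
  refine PySem.List.foldl_congr_mem _ _ _ _ ?_
  intro acc i hi
  obtain ⟨h0, hlt⟩ := (PySem.List.mem_pyRange_one).mp hi
  obtain ⟨k, rfl⟩ : ∃ k : Nat, i = (k : Int) := ⟨i.toNat, (Int.toNat_of_nonneg h0).symm⟩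
  have hk : k < answers.length := by exact_mod_cast hlt
  have hmod : PySem.Int.mod (k : Int) L = ((k % p.length : Nat) : Int) := by
    rw [← hL]
    show Int.fmod (k : Int) (p.length : Int) = _
    rw [Int.fmod_eq_emod]
    push_cast
    simp
  rw [hmod]
  simp only [PySem.List.pyGetD_natCast]
  rw [setLen_getD p answers.length k hp hk]

lemma triple_split {α : Type} (l : List α) (f1 f2 f3 : Int → α → Int) (a b c : Int) :
    (l.foldl (fun (s : Int × Int × Int) x => (f1 s.1 x, f2 s.2.1 x, f3 s.2.2 x)) (a, b, c))
      = (l.foldl f1 a, l.foldl f2 b, l.foldl f3 c) := by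
  induction l generalizing a b c with
  | nil => rfl
  | cons x t ih => simpa using ih (f1 a x) (f2 b x) (f3 c x)

-- B's per-student component of the enumerate pass equals the range-fold count
lemma enum_count_eq (answers p : List Int) (L : Int) :
    ((PySem.List.enumerate answers 0).foldl
        (fun (c : Int) ia =>
          if ia.2 = PySem.List.pyGetD p (PySem.Int.mod ia.1 L) 0 then c + 1 else c) 0)
      = cnt answers p L := by
  unfold cnt
  rw [PySem.List.enumerate_eq_map_pyRange (d := 0), List.foldl_map]
  simp only [PySem.List.len_eq]

lemma A_eq (answers : List Int) :
    solution answers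
      = sel (cnt answers [1,2,3,4,5] 5) (cnt answers [2,1,2,3,2,4,2,5] 8)
            (cnt answers [3,3,1,1,2,2,4,4,5,5] 10) := by
  simp only [solution]
  rw [countLoop_eq_cnt answers [1,2,3,4,5] 5 (by simp) (by simp),
      countLoop_eq_cnt answers [2,1,2,3,2,4,2,5] 8 (by simp) (by simp),
      countLoop_eq_cnt answers [3,3,1,1,2,2,4,4,5,5] 10 (by simp) (by simp)]
  set c1 := cnt answers [1,2,3,4,5] 5
  set c2 := cnt answers [2,1,2,3,2,4,2,5] 8
  set c3 := cnt answers [3,3,1,1,2,2,4,4,5,5] 10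
  have hmax : (PySem.List.max? [c1, c2, c3] (fun y => y)).getD 0 = max c1 (max c2 c3) := by
    rw [PySem.List.max?_id_cons]
    simp [List.foldl, max_assoc]
  rw [hmax]
  have hrange : PySem.List.pyRange 0 3 1 = [0, 1, 2] := by decide
  rw [hrange]
  simp only [List.foldl]
  norm_num [sel, PySem.List.pyGetD, PySem.List.pyGet?, PySem.List.pyIdx?, Int.toNat]
  split_ifs <;> simp

lemma B_eq (answers : List Int) :
    solution_alt answers
      = sel (cnt answers [1,2,3,4,5] 5) (cnt answers [2,1,2,3,2,4,2,5] 8)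
            (cnt answers [3,3,1,1,2,2,4,4,5,5] 10) := by
  simp only [solution_alt]
  rw [triple_split (PySem.List.enumerate answers 0)
        (fun s ia => if ia.2 = PySem.List.pyGetD ([1,2,3,4,5] : List Int) (PySem.Int.mod ia.1 5) 0 then s + 1 else s)
        (fun s ia => if ia.2 = PySem.List.pyGetD ([2,1,2,3,2,4,2,5] : List Int) (PySem.Int.mod ia.1 8) 0 then s + 1 else s)
        (fun s ia => if ia.2 = PySem.List.pyGetD ([3,3,1,1,2,2,4,4,5,5] : List Int) (PySem.Int.mod ia.1 10) 0 then s + 1 else s)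
        0 0 0]
  rw [enum_count_eq answers [1,2,3,4,5] 5,
      enum_count_eq answers [2,1,2,3,2,4,2,5] 8,
      enum_count_eq answers [3,3,1,1,2,2,4,4,5,5] 10]
  set c1 := cnt answers [1,2,3,4,5] 5
  set c2 := cnt answers [2,1,2,3,2,4,2,5] 8
  set c3 := cnt answers [3,3,1,1,2,2,4,4,5,5] 10
  simp only [PySem.List.enumerate_cons, PySem.List.enumerate_nil, List.filterMap]
  norm_num [sel]
  split_ifs <;> simp

-- ===== VERDICT (by name: the statement is the Claim_ definition above) =====
theorem solution_spec : Claim_equal_solution := by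
  intro answers _
  show solution answers = solution_alt answers
  rw [A_eq, B_eq]
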